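-- pv_equiv track=rewrite | github.com/MooijGedaan/AdventOfCode | aoc/year2024/day04.py | parse_as_diagonal_tr_bl
-- ===== SOURCE A (Python) =====
-- def parse_as_rows(data: str) -> list[str]:
--     return data.strip().splitlines()
--
-- def parse_as_diagonal_tr_bl(data: str) -> list[str]:
--     data_as_rows = parse_as_rows(data)
--
--     rows = len(data_as_rows)
--     cols = len(data_as_rows[0])
--     diagonal_map = {}
--
--     for i in range(rows):
--         for j in range(cols):
--             key = i + j
--             if key not in diagonal_map:
--                 diagonal_map[key] = []
--             diagonal_map[key].append(data_as_rows[i][j])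
--
--     sorted_keys = sorted(diagonal_map.keys())
--     return ["".join(diagonal_map[key]) for key in sorted_keys]
-- ===== SOURCE B (Python) =====
-- def parse_as_diagonal_tr_bl(data: str) -> list[str]:
--     data_as_rows = data.strip().splitlines()
--     rows = len(data_as_rows)
--     cols = len(data_as_rows[0])
--     return [
--         "".join(data_as_rows[i][d - i] for i in range(max(0, d - cols + 1), min(d, rows - 1) + 1))
--         for d in range(rows + cols - 1)
--     ]
-- ===== Notes on version B (the rewrite author's own statement) =====
-- stated objective: simpler
-- what changed: B drops A's grouping dict and key sort entirely and emits each diagonal d = i + j directly by joining the characters over its closed-form row range, in one comprehension.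
import Mathlib
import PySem

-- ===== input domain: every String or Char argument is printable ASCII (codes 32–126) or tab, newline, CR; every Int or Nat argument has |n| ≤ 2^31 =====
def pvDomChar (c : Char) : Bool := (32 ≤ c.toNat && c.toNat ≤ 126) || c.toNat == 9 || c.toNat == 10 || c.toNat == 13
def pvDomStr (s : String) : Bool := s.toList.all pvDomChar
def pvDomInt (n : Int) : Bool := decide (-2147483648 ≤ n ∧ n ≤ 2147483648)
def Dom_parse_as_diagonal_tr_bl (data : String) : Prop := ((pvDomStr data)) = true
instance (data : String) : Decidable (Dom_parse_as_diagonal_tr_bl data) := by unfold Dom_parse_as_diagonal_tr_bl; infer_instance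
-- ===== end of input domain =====

-- B replaces A's grouping dict + key sort by directly emitting each diagonal d = i + j
-- from its index range, in one comprehension (simpler; same return value).

-- ===== PORT A =====
def parse_as_rows (data : String) : List String :=
  PySem.Str.splitlines (PySem.Str.strip data)

def parse_as_diagonal_tr_bl (data : String) : List String :=
  let data_as_rows := parse_as_rows data
  let rows : Int := (data_as_rows.length : Int)
  let cols : Int := PySem.Str.len ((PySem.List.pyGet? data_as_rows 0).getD "")
  let dm : PySem.Dict Int (List Char) :=
    (PySem.List.pyRange 0 rows).foldl (fun dm i =>
      (PySem.List.pyRange 0 cols).foldl (fun dm j =>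
        let key := i + j
        let dm := if dm.contains key then dm else dm.insert key []
        dm.modify key [] (fun l =>
          l ++ [(PySem.Str.pyGet? ((PySem.List.pyGet? data_as_rows i).getD "") j).getD ' '])) dm)
      PySem.Dict.empty
  let sorted_keys := PySem.List.sorted dm.keys (fun k => k)
  sorted_keys.map (fun key => String.ofList (dm.getD key []))

-- ===== PORT B =====
def parse_as_diagonal_tr_bl_alt (data : String) : List String :=
  let data_as_rows := PySem.Str.splitlines (PySem.Str.strip data)
  let rows : Int := (data_as_rows.length : Int)
  let cols : Int := PySem.Str.len ((PySem.List.pyGet? data_as_rows 0).getD "")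
  (PySem.List.pyRange 0 (rows + cols - 1)).map (fun d =>
    String.ofList ((PySem.List.pyRange (max 0 (d - cols + 1)) (min d (rows - 1) + 1)).map
      (fun i => (PySem.Str.pyGet? ((PySem.List.pyGet? data_as_rows i).getD "") (d - i)).getD ' ')))

-- ===== PRECONDITION & SPEC =====
-- Pre_ excludes exactly the inputs on which the Python A raises IndexError: an input whose
-- stripped text has no lines, or one with a line shorter than the first line.  The conjunct
-- 0 < len(first line) is automatic for every nonempty splitlines(strip(data)) (the first line
-- after strip starts with a non-whitespace character), so it excludes no further input.
def Pre_parse_as_diagonal_tr_bl (data : String) : Prop :=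
  let rs := PySem.Str.splitlines (PySem.Str.strip data)
  rs ≠ [] ∧ 0 < PySem.Str.len (rs.headD "") ∧
    ∀ r ∈ rs, PySem.Str.len (rs.headD "") ≤ PySem.Str.len r
instance (data : String) : Decidable (Pre_parse_as_diagonal_tr_bl data) := by
  unfold Pre_parse_as_diagonal_tr_bl; infer_instance

def pvWitness_parse_as_diagonal_tr_bl : String := "XMAS\nMASX\nASXM"

def Spec_parse_as_diagonal_tr_bl (data : String) (out : List String) : Prop := out = parse_as_diagonal_tr_bl_alt data
instance (data : String) (out : List String) : Decidable (Spec_parse_as_diagonal_tr_bl data out) := by unfold Spec_parse_as_diagonal_tr_bl; infer_instance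

-- ===== CLAIM (what is proved, stated in full; the proofs are below) =====
def Claim_equal_parse_as_diagonal_tr_bl : Prop := ∀ (data : String), Dom_parse_as_diagonal_tr_bl data → Pre_parse_as_diagonal_tr_bl data → Spec_parse_as_diagonal_tr_bl data (parse_as_diagonal_tr_bl data)

-- ===== LEMMAS AND PROOFS =====

lemma update_of_subset (s : PySem.Set Int) (xs : List Int) (h : ∀ x ∈ xs, x ∈ s) :
    PySem.Set.update s xs = s := by
  induction xs generalizing s with
  | nil => rfl
  | cons x xs ih =>
      have : PySem.Set.update s (x :: xs) = PySem.Set.update (s.add x) xs := rfl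
      rw [this, PySem.Set.add_of_mem (h x (by simp))]
      exact ih s (fun y hy => h y (by simp [hy]))

lemma update_pyRange_right (K : Int) (hK : 0 ≤ K) (m : Nat) :
    PySem.Set.update (PySem.List.pyRange 0 K) (PySem.List.pyRange K (K + m)) =
      PySem.List.pyRange 0 (K + m) := by
  induction m with
  | zero => simp [PySem.List.pyRange_one_eq_nil (le_refl K)]
  | succ m ih =>
      have h1 : (K : Int) ≤ K + m := by omega
      have h2 : PySem.List.pyRange K (K + (m + 1 : Nat)) = PySem.List.pyRange K (K + m) ++ [K + m] := by
        have := PySem.List.pyRange_one_succ_right (a := K) (b := K + m) h1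
        rw [← this]; push_cast; ring_nf
      rw [h2]
      have h3 : PySem.Set.update (PySem.List.pyRange 0 K) (PySem.List.pyRange K (K + m) ++ [K + m]) =
          PySem.Set.add (PySem.Set.update (PySem.List.pyRange 0 K) (PySem.List.pyRange K (K + m))) (K + m) := by
        simp [PySem.Set.update]
      rw [h3, ih, PySem.Set.add_of_not_mem (by simp [PySem.List.mem_pyRange_one]),
        ← PySem.List.pyRange_one_succ_right (by omega : (0:Int) ≤ K + m)]
      push_cast; ring_nf

lemma ofList_append (xs ys : List Int) :
    PySem.Set.ofList (xs ++ ys) = PySem.Set.update (PySem.Set.ofList xs) ys := by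
  simp [PySem.Set.ofList_eq_foldl, PySem.Set.update, List.foldl_append]

lemma map_add_pyRange (a c : Int) :
    (PySem.List.pyRange 0 c).map (fun j => a + j) = PySem.List.pyRange a (a + c) := by
  rw [PySem.List.pyRange_one, PySem.List.pyRange_one, List.map_map]
  simp

lemma keys_eq (n c : Nat) (hn : 1 ≤ n) (hc : 1 ≤ c) :
    PySem.Set.ofList ((PySem.List.pyRange 0 n).flatMap
        (fun i => (PySem.List.pyRange 0 c).map (fun j => i + j))) =
      PySem.List.pyRange 0 ((n : Int) + c - 1) := by
  induction n with
  | zero => omega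
  | succ n ih =>
      rcases Nat.eq_or_lt_of_le hn with h1 | h1
      · -- n + 1 = 1
        have hn0 : n = 0 := by omega
        subst hn0
        have : PySem.List.pyRange 0 ((1:Nat) : Int) = [0] := by decide
        rw [this]
        simp only [List.flatMap_cons, List.flatMap_nil, List.append_nil]
        rw [show ((PySem.List.pyRange 0 c).map (fun j => (0:Int) + j)) = PySem.List.pyRange 0 c by
          simpa using map_add_pyRange 0 c]
        rw [PySem.Set.ofList_eq_self_of_nodup _ (PySem.List.nodup_pyRange_one 0 c)]
        congr 1; push_cast; ring
      · have hn' : 1 ≤ n := by omega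
        have hsplit : PySem.List.pyRange 0 ((n+1 : Nat) : Int) = PySem.List.pyRange 0 n ++ [(n:Int)] := by
          have := PySem.List.pyRange_one_succ_right (a := 0) (b := (n:Int)) (by positivity)
          rw [← this]; push_cast; ring_nf
        rw [hsplit, List.flatMap_append, ofList_append, ih hn']
        simp only [List.flatMap_cons, List.flatMap_nil, List.append_nil]
        rw [map_add_pyRange]
        have hsplit2 : PySem.List.pyRange (n:Int) (n + c) =
            PySem.List.pyRange n ((n:Int) + c - 1) ++ PySem.List.pyRange ((n:Int) + c - 1) (n + c) := by
          exact PySem.List.pyRange_one_append _ _ _ (by omega) (by omega)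
        rw [hsplit2]
        have hupd : ∀ s xs ys, PySem.Set.update s (xs ++ ys) = PySem.Set.update (PySem.Set.update s (xs : List Int)) ys := by
          intro s xs ys; simp [PySem.Set.update]
        rw [hupd, update_of_subset (PySem.List.pyRange 0 ((n:Int) + c - 1))
          (PySem.List.pyRange (n:Int) ((n:Int) + c - 1)) (by
          intro x hx
          rw [PySem.List.mem_pyRange_one] at hx ⊢
          omega)]
        have : PySem.List.pyRange ((n:Int) + c - 1) ((n:Int) + c) =
            PySem.List.pyRange ((n:Int) + c - 1) (((n:Int) + c - 1) + (1:Nat)) := by push_cast; ring_nf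
        rw [this, update_pyRange_right _ (by omega)]
        congr 1; push_cast; ring

def pvChar (rs : List String) (i j : Int) : Char :=
  (PySem.Str.pyGet? ((PySem.List.pyGet? rs i).getD "") j).getD ' '

lemma filter_pyRange_beq (c i d : Int) :
    (PySem.List.pyRange 0 c).filter (fun j => i + j == d) =
      if 0 ≤ d - i ∧ d - i < c then [d - i] else [] := by
  have hcong : (PySem.List.pyRange 0 c).filter (fun j => i + j == d) =
      (PySem.List.pyRange 0 c).filter (fun j => j == d - i) := by
    apply List.filter_congr
    intro j _
    rw [Bool.eq_iff_iff]
    simp only [beq_iff_eq]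
    omega
  rw [hcong, List.filter_beq]
  by_cases h : 0 ≤ d - i ∧ d - i < c
  · rw [if_pos h, List.count_eq_one_of_mem (PySem.List.nodup_pyRange_one 0 c)
      (by rw [PySem.List.mem_pyRange_one]; omega)]
    rfl
  · rw [if_neg h, List.count_eq_zero_of_not_mem (by rw [PySem.List.mem_pyRange_one]; omega)]
    rfl

lemma filter_row (rs : List String) (i d : Int) (c : Int) :
    (((PySem.List.pyRange 0 c).map (fun j => (i + j, pvChar rs i j))).filter
        (fun p => p.1 == d)).map (fun p => p.2) =
      if 0 ≤ d - i ∧ d - i < c then [pvChar rs i (d - i)] else [] := by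
  rw [List.filter_map, List.map_map]
  have : ((fun (p : Int × Char) => p.1 == d) ∘ fun j => (i + j, pvChar rs i j)) = fun j => i + j == d := rfl
  rw [this, filter_pyRange_beq]
  by_cases h : 0 ≤ d - i ∧ d - i < c
  · rw [if_pos h, if_pos h]
    rfl
  · rw [if_neg h, if_neg h, List.map_nil]

lemma diag_eq (rs : List String) (d c : Int) (n : Nat) :
    ((PySem.List.pyRange 0 n).flatMap
        (fun i => if 0 ≤ d - i ∧ d - i < c then [pvChar rs i (d - i)] else [])) =
      (PySem.List.pyRange (max 0 (d - c + 1)) (min d ((n : Int) - 1) + 1)).map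
        (fun i => pvChar rs i (d - i)) := by
  induction n with
  | zero =>
      rw [PySem.List.pyRange_one_eq_nil (by simp), PySem.List.pyRange_one_eq_nil (by omega)]
      rfl
  | succ n ih =>
      have hsplit : PySem.List.pyRange 0 ((n+1 : Nat) : Int) = PySem.List.pyRange 0 n ++ [(n:Int)] := by
        have := PySem.List.pyRange_one_succ_right (a := 0) (b := (n:Int)) (by positivity)
        rw [← this]; push_cast; ring_nf
      rw [hsplit, List.flatMap_append, ih]
      simp only [List.flatMap_cons, List.flatMap_nil, List.append_nil]
      by_cases h : 0 ≤ d - (n:Int) ∧ d - (n:Int) < c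
      · rw [if_pos h]
        have h1 : min d ((n:Int) - 1) + 1 = (n:Int) := by omega
        have h2 : min d (((n:Nat)+1 : Int) - 1) + 1 = (n:Int) + 1 := by omega
        have h3 : max 0 (d - c + 1) ≤ (n:Int) := by omega
        rw [h1]
        have h4 : min d ((((n+1 : Nat)):Int) - 1) + 1 = (n:Int) + 1 := by push_cast; omega
        rw [h4, PySem.List.pyRange_one_succ_right h3, List.map_append, List.map_cons, List.map_nil]
      · rw [if_neg h, List.append_nil]
        rcases (by omega : d < (n:Int) ∨ (n:Int) + c ≤ d) with h' | h'
        · have : min d (((n+1 : Nat) : Int) - 1) = min d ((n:Int) - 1) := by push_cast; omega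
          rw [this]
        · rw [PySem.List.pyRange_one_eq_nil (by omega), PySem.List.pyRange_one_eq_nil (by push_cast; omega)]

lemma dict_step_eq {ν : Type} (dm : PySem.Dict Int (List ν)) (k : Int) (f : List ν → List ν) :
    (if dm.contains k then dm else dm.insert k []).modify k [] f = dm.modify k [] f := by
  by_cases h : dm.contains k
  · simp [h]
  · simp only [eq_false_of_ne_true h, if_neg Bool.false_ne_true, PySem.Dict.modify,
      PySem.Dict.getD_insert_self, PySem.Dict.insert_insert_self,
      PySem.Dict.getD_of_not_contains dm [] (eq_false_of_ne_true h)]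

lemma core (rs : List String) (hne : rs ≠ [])
    (hc : 0 < PySem.Str.len (rs.headD "")) :
    (let rows : Int := (rs.length : Int)
     let cols : Int := PySem.Str.len ((PySem.List.pyGet? rs 0).getD "")
     let dm : PySem.Dict Int (List Char) :=
       (PySem.List.pyRange 0 rows).foldl (fun dm i =>
         (PySem.List.pyRange 0 cols).foldl (fun dm j =>
           let key := i + j
           let dm := if dm.contains key then dm else dm.insert key []
           dm.modify key [] (fun l => l ++ [pvChar rs i j])) dm)
         PySem.Dict.empty
     (PySem.List.sorted dm.keys (fun k => k)).map (fun key => String.ofList (dm.getD key []))) =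
    (let rows : Int := (rs.length : Int)
     let cols : Int := PySem.Str.len ((PySem.List.pyGet? rs 0).getD "")
     (PySem.List.pyRange 0 (rows + cols - 1)).map (fun d =>
       String.ofList ((PySem.List.pyRange (max 0 (d - cols + 1)) (min d (rows - 1) + 1)).map
         (fun i => pvChar rs i (d - i))))) := by
  obtain ⟨r, t, rfl⟩ : ∃ r t, rs = r :: t := by
    cases rs with
    | nil => exact absurd rfl hne
    | cons r t => exact ⟨r, t, rfl⟩
  have h0 : PySem.List.pyGet? (r :: t) 0 = some r := by
    simpa using PySem.List.pyGet?_natCast (r :: t) 0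
  simp only [h0, Option.getD_some, PySem.Str.len_eq] at hc ⊢
  have hc1 : 1 ≤ r.toList.length := by exact_mod_cast hc
  have hn1 : 1 ≤ (r :: t).length := by simp
  -- abbreviations
  set nN : Nat := (r :: t).length with hnN
  set cN : Nat := r.toList.length with hcN
  set L : List (Int × Char) := (PySem.List.pyRange 0 (nN : Int)).flatMap
      (fun i => (PySem.List.pyRange 0 (cN : Int)).map (fun j => (i + j, pvChar (r :: t) i j))) with hL
  simp only [dict_step_eq]
  have E : (PySem.List.pyRange 0 (nN : Int)).foldl (fun dm i =>
        (PySem.List.pyRange 0 (cN : Int)).foldl (fun dm j =>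
          dm.modify (i + j) [] (fun l => l ++ [pvChar (r :: t) i j])) dm)
        (PySem.Dict.empty : PySem.Dict Int (List Char)) =
      L.foldl (fun dm p => dm.modify p.1 [] (fun l => l ++ [p.2])) PySem.Dict.empty := by
    rw [hL, List.foldl_flatMap]
    simp only [List.foldl_map]
  rw [E]
  have K : (L.foldl (fun dm p => dm.modify p.1 [] (fun l => l ++ [p.2]))
        (PySem.Dict.empty : PySem.Dict Int (List Char))).keys =
      PySem.List.pyRange 0 ((nN : Int) + cN - 1) := by
    rw [PySem.Dict.keys_foldl_modify_key L Prod.fst []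
      (fun _ p => fun l => l ++ [p.2]) PySem.Dict.empty]
    rw [PySem.Dict.keys_empty]
    have hmapfst : L.map Prod.fst = (PySem.List.pyRange 0 (nN : Int)).flatMap
        (fun i => (PySem.List.pyRange 0 (cN : Int)).map (fun j => i + j)) := by
      rw [hL, List.map_flatMap]
      simp only [List.map_map]
      rfl
    show PySem.Set.update [] (L.map Prod.fst) = _
    rw [hmapfst]
    have : PySem.Set.update ([] : PySem.Set Int) = PySem.Set.ofList := rfl
    rw [this]
    exact keys_eq nN cN hn1 hc1
  have S : PySem.List.sorted (L.foldl (fun dm p => dm.modify p.1 [] (fun l => l ++ [p.2]))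
        (PySem.Dict.empty : PySem.Dict Int (List Char))).keys (fun k => k) =
      PySem.List.pyRange 0 ((nN : Int) + cN - 1) := by
    rw [K]
    exact PySem.List.sorted_eq_of_perm_of_pairwise_lt _ _ _ (List.Perm.refl _)
      (PySem.List.pairwise_lt_pyRange_one 0 _)
  rw [S]
  apply List.map_congr_left
  intro d _
  congr 1
  rw [PySem.Dict.getD_foldl_modify_append L PySem.Dict.empty d, PySem.Dict.getD_empty,
    List.nil_append, hL, List.filter_flatMap, List.map_flatMap]
  simp only [filter_row]
  exact diag_eq (r :: t) d (cN : Int) nN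

-- ===== VERDICT (by name: the statement is the Claim_ definition above) =====
theorem parse_as_diagonal_tr_bl_spec : Claim_equal_parse_as_diagonal_tr_bl := by
  intro data _ hpre
  unfold Spec_parse_as_diagonal_tr_bl parse_as_diagonal_tr_bl parse_as_diagonal_tr_bl_alt parse_as_rows
  obtain ⟨hne, hc, -⟩ := hpre
  exact core _ hne hc
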